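-- pv_equiv track=rewrite | github.com/JulianBarraganG/Continuous-SVERL-P | src/sverl/utils.py | get_all_subsets
-- ===== SOURCE A (Python) =====
-- def get_all_subsets(fixed_features, list_length):
--     """
--     generate all binary lists of given length with certain positions fixed to 0.
--
--     args:
--         fixed_features: list of indices that must be 0 in all variations
--         list_length: total length of the binary lists to generate
--
--     returns:
--         list of all possible binary lists with the specified features fixed to 0
--     """
--     variations = []
--
--     # calculate how many bits we need to vary (total length minus fixed positions)
--     variable_positions = [pos for pos in range(list_length) if pos not in fixed_features]
--     num_variable_bits = len(variable_positions)
--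
--     # generate all possible combinations for the variable bits
--     for num in range(2 ** num_variable_bits):
--         binary = [0] * list_length
--
--         # fill in the variable positions
--         for bit_pos in range(num_variable_bits):
--             # get the current variable position in the original list
--             original_pos = variable_positions[bit_pos]
--             # get the bit value (0 or 1)
--             bit_value = (num >> (num_variable_bits - 1 - bit_pos)) & 1
--             binary[original_pos] = bit_value
--
--         variations.append(binary)
--
--     return variations
-- ===== SOURCE B (Python) =====
-- def get_all_subsets(fixed_features, list_length):
--     """Build the variations by repeated doubling over the variable positions
--     instead of decoding integers bit by bit."""
--     variable_positions = [pos for pos in range(list_length) if pos not in fixed_features]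
--     variations = [[0] * list_length]
--     for p in variable_positions:
--         new_variations = []
--         for v in variations:
--             new_variations.append(v)
--             w = v.copy()
--             w[p] = 1
--             new_variations.append(w)
--         variations = new_variations
--     return variations
-- ===== Notes on version B (the rewrite author's own statement) =====
-- stated objective: alternative
-- what changed: B builds the result by repeated doubling (for each variable position, expand every existing list into a 0-copy and a 1-copy) instead of decoding each integer 0..2^k-1 bit by bit into a fresh list.
import Mathlib
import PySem

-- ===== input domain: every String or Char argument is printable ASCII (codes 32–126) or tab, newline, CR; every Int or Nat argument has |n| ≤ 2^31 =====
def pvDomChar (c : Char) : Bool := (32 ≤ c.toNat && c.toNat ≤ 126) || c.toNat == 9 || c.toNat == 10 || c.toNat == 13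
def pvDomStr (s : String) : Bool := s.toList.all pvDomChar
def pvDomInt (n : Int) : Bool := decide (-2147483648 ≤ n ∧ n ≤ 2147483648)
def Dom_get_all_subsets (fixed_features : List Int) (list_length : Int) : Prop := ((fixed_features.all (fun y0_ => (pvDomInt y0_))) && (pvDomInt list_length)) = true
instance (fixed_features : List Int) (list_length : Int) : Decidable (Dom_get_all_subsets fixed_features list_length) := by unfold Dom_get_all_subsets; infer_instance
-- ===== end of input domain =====

-- B builds the variation list by repeated doubling over the variable positions instead of
-- decoding each integer 0..2^k-1 bit by bit (objective: alternative decomposition, similar cost).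


-- ===== PORT A =====
def get_all_subsets (fixed_features : List Int) (list_length : Int) : List (List Int) :=
  let variable_positions := (PySem.List.pyRange 0 list_length 1).filter (fun pos => !(fixed_features.contains pos))
  let num_variable_bits : Nat := variable_positions.length
  -- for num in range(2 ** num_variable_bits): …  (the exponent is len(...), hence a Nat, as in Python it is ≥ 0)
  (PySem.List.pyRange 0 ((2:Int) ^ num_variable_bits) 1).foldl (fun variations (num : Int) =>
    let binary : List Int := List.replicate list_length.toNat 0   -- [0] * list_length
    -- for bit_pos in range(num_variable_bits): …
    let binary := (PySem.List.pyRange 0 (num_variable_bits : Int) 1).foldl (fun b bit_pos =>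
      -- Python `num >> s` is Lean `num >>> s`; the shift amount here is provably ≥ 0, so .toNat is exact
      PySem.List.pySetD b (PySem.List.pyGetD variable_positions bit_pos 0)   -- index provably in range
        (PySem.Int.band (num >>> ((num_variable_bits : Int) - 1 - bit_pos).toNat) 1)) binary
        -- binary[original_pos] = bit_value, index provably in range
    variations ++ [binary]) []

-- ===== PORT B =====
def get_all_subsets_alt (fixed_features : List Int) (list_length : Int) : List (List Int) :=
  let variable_positions := (PySem.List.pyRange 0 list_length 1).filter (fun pos => !(fixed_features.contains pos))
  variable_positions.foldl (fun variations p =>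
    variations.foldl (fun new_variations v =>
      (new_variations ++ [v]) ++ [PySem.List.pySetD v p 1]) [])  -- w = v.copy(); w[p] = 1 (in range)
    [List.replicate list_length.toNat 0]

-- ===== PRECONDITION & SPEC =====
def Spec_get_all_subsets (fixed_features : List Int) (list_length : Int) (out : List (List Int)) : Prop := out = get_all_subsets_alt fixed_features list_length
instance (fixed_features : List Int) (list_length : Int) (out : List (List Int)) : Decidable (Spec_get_all_subsets fixed_features list_length out) := by unfold Spec_get_all_subsets; infer_instance

-- ===== CLAIM (what is proved, stated in full; the proofs are below) =====
def Claim_equal_get_all_subsets : Prop := ∀ (fixed_features : List Int) (list_length : Int), Dom_get_all_subsets fixed_features list_length → Spec_get_all_subsets fixed_features list_length (get_all_subsets fixed_features list_length)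

-- ===== LEMMAS AND PROOFS =====

-- A's inner loop, as a structural recursion over the variable positions (num : Int)
def rowA : List Int → Int → List Int → List Int
  | [], _, b => b
  | p :: rest, num, b =>
      rowA rest num (PySem.List.pySetD b p (PySem.Int.band (num >>> rest.length) 1))

-- the same row-builder with a Nat counter and plain arithmetic bits
def rowN : List Int → Nat → List Int → List Int
  | [], _, b => b
  | p :: rest, m, b => rowN rest m (b.set p.toNat ((m / 2 ^ rest.length) % 2 : Nat))

-- B's doubling step, named
def stepB (vars : List (List Int)) (p : Int) : List (List Int) :=
  vars.foldl (fun acc v => (acc ++ [v]) ++ [PySem.List.pySetD v p 1]) []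

lemma innerA (w : List Int) (num : Int) :
  ∀ (j : Nat) (b : List Int), j ≤ w.length →
    (PySem.List.pyRange (j : Int) (w.length : Int) 1).foldl
      (fun b bit_pos =>
        PySem.List.pySetD b (PySem.List.pyGetD w bit_pos 0)
          (PySem.Int.band (num >>> ((w.length : Int) - 1 - bit_pos).toNat) 1)) b
    = rowA (w.drop j) num b := by
  intro j
  induction hn : w.length - j generalizing j with
  | zero =>
    intro b hj
    have hje : j = w.length := by omega
    subst hje
    rw [PySem.List.pyRange_one_eq_nil (by omega), List.drop_length]
    rfl
  | succ n ih =>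
    intro b hj
    have hjlt : j < w.length := by omega
    rw [PySem.List.pyRange_one_cons (by exact_mod_cast hjlt)]
    simp only [List.foldl_cons]
    have h1 : ((j : Int) + 1) = ((j + 1 : Nat) : Int) := by push_cast; ring
    rw [h1, ih (j+1) (by omega) _ (by omega)]
    rw [List.drop_eq_getElem_cons hjlt]
    simp only [rowA]
    have hg : PySem.List.pyGetD w (j : Int) 0 = w[j] := by
      rw [PySem.List.pyGetD_natCast]; exact List.getD_eq_getElem w 0 hjlt
    have hl : (List.drop (j+1) w).length = ((w.length : Int) - 1 - (j : Int)).toNat := by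
      rw [List.length_drop]; omega
    rw [hg, hl]

lemma innerA0 (w : List Int) (num : Int) (b : List Int) :
    (PySem.List.pyRange 0 ((w.length : Nat) : Int) 1).foldl
      (fun b bit_pos =>
        PySem.List.pySetD b (PySem.List.pyGetD w bit_pos 0)
          (PySem.Int.band (num >>> ((w.length : Int) - 1 - bit_pos).toNat) 1)) b
    = rowA w num b := by
  have h := innerA w num 0 b (by omega)
  simpa using h

lemma rowA_eq_rowN (vps : List Int) (m : Nat) :
    ∀ b, (∀ p ∈ vps, 0 ≤ p) → rowA vps (m : Int) b = rowN vps m b := by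
  induction vps with
  | nil => intro b _; rfl
  | cons p rest ih =>
    intro b h
    have hp : 0 ≤ p := h p (List.mem_cons_self ..)
    simp only [rowA, rowN]
    rw [PySem.List.pySetD_of_nonneg b _ hp]
    have hsh : ((m : Int) >>> rest.length) = ((m >>> rest.length : Nat) : Int) := rfl
    have hb : PySem.Int.band ((m : Int) >>> rest.length) 1
        = (((m >>> rest.length) &&& 1 : Nat) : Int) := by
      rw [hsh]
      exact_mod_cast PySem.Int.band_natCast (m >>> rest.length) 1
    rw [hb, Nat.and_one_is_mod, Nat.shiftRight_eq_div_pow]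
    exact ih _ (fun q hq => h q (List.mem_cons_of_mem _ hq))

lemma bit_high (k j m : Nat) (h : j < k) : (2 ^ k + m) / 2 ^ j % 2 = m / 2 ^ j % 2 := by
  have hk : 2 ^ k = 2 ^ (k - j) * 2 ^ j := by rw [← pow_add]; congr 1; omega
  have hpos : 0 < 2 ^ j := Nat.two_pow_pos j
  rw [hk, Nat.add_comm, Nat.add_mul_div_right _ _ hpos]
  have h2 : 2 ^ (k - j) = 2 * 2 ^ (k - j - 1) := by
    rw [← pow_succ']; congr 1; omega
  rw [h2]
  omega

lemma rowN_high (vps : List Int) (k : Nat) (hk : vps.length ≤ k) (m : Nat) :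
    ∀ b, rowN vps (2 ^ k + m) b = rowN vps m b := by
  induction vps with
  | nil => intro b; rfl
  | cons p rest ih =>
    intro b
    simp only [rowN]
    rw [bit_high k rest.length m (by simp at hk; omega)]
    exact ih (by simp at hk; omega) _

lemma set_zero_self (b : List Int) (i : Nat) (h : b[i]? = some 0) : b.set i 0 = b := by
  obtain ⟨hi, hv⟩ := List.getElem?_eq_some_iff.mp h
  rw [← hv]
  exact List.set_getElem_self ..

lemma stepB_append (l1 l2 : List (List Int)) (p : Int) :
    stepB (l1 ++ l2) p = stepB l1 p ++ stepB l2 p := by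
  simp [stepB]

lemma foldB_append (vps : List Int) :
    ∀ (l1 l2 : List (List Int)), vps.foldl stepB (l1 ++ l2) = vps.foldl stepB l1 ++ vps.foldl stepB l2 := by
  induction vps with
  | nil => intro l1 l2; rfl
  | cons p rest ih =>
    intro l1 l2
    simp only [List.foldl_cons, stepB_append]
    exact ih _ _

lemma main_eq (vps : List Int) :
    ∀ b, vps.Pairwise (· < ·) →
      (∀ p ∈ vps, 0 ≤ p ∧ p.toNat < b.length ∧ b[p.toNat]? = some (0:Int)) →
      (List.range (2 ^ vps.length)).map (fun m => rowN vps m b) = vps.foldl stepB [b] := by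
  induction vps with
  | nil => intro b _ _; simp [rowN]
  | cons p rest ih =>
    intro b hord hinv
    obtain ⟨hp0, hplen, hpval⟩ := hinv p (List.mem_cons_self ..)
    have hlt : ∀ q ∈ rest, p < q := (List.pairwise_cons.mp hord).1
    have hordr : rest.Pairwise (· < ·) := (List.pairwise_cons.mp hord).2
    -- right side: one doubling step, then split the fold over the concatenation
    have hstep : stepB [b] p = [b] ++ [b.set p.toNat 1] := by
      simp [stepB, PySem.List.pySetD_of_nonneg b 1 hp0]
    rw [List.foldl_cons, hstep, foldB_append]
    -- left side: split the range in two halves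
    have hpow : 2 ^ (p :: rest).length = 2 ^ rest.length + 2 ^ rest.length := by
      simp [List.length_cons, pow_succ]; ring
    rw [hpow, List.range_add, List.map_append, List.map_map]
    congr 1
    · -- low half: the bit at p is 0
      have h1 : ∀ m ∈ List.range (2 ^ rest.length),
          rowN (p :: rest) m b = rowN rest m b := by
        intro m hm
        have hmlt := List.mem_range.mp hm
        simp only [rowN]
        rw [Nat.div_eq_of_lt hmlt]
        norm_num
        rw [set_zero_self b p.toNat hpval]
      rw [List.map_congr_left h1]
      exact ih b hordr (fun q hq => hinv q (List.mem_cons_of_mem _ hq))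
    · -- high half: the bit at p is 1
      have h2 : ∀ m ∈ List.range (2 ^ rest.length),
          ((fun m => rowN (p :: rest) m b) ∘ fun x => 2 ^ rest.length + x) m
            = rowN rest m (b.set p.toNat 1) := by
        intro m hm
        simp only [Function.comp_apply]
        have hmlt := List.mem_range.mp hm
        simp only [rowN]
        have hdiv : (2 ^ rest.length + m) / 2 ^ rest.length % 2 = 1 := by
          rw [Nat.add_comm, Nat.add_div_right _ (Nat.two_pow_pos _),
            Nat.div_eq_of_lt hmlt]
        rw [hdiv]
        norm_num
        exact rowN_high rest rest.length (le_refl _) m _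
      rw [List.map_congr_left h2]
      refine ih (b.set p.toNat 1) hordr ?_
      intro q hq
      obtain ⟨hq0, hqlen, hqval⟩ := hinv q (List.mem_cons_of_mem _ hq)
      have hpq : p.toNat ≠ q.toNat := by
        have := hlt q hq; omega
      refine ⟨hq0, by simpa using hqlen, ?_⟩
      rw [List.getElem?_set_ne hpq]
      exact hqval

-- ===== VERDICT (by name: the statement is the Claim_ definition above) =====
theorem get_all_subsets_spec : Claim_equal_get_all_subsets := by
  intro ff n _
  unfold Spec_get_all_subsets
  set w := (PySem.List.pyRange 0 n 1).filter (fun pos => !(ff.contains pos)) with hw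
  set base := List.replicate n.toNat (0:Int) with hbase
  have hA : get_all_subsets ff n
      = (PySem.List.pyRange 0 ((2:Int) ^ w.length) 1).foldl (fun variations (num : Int) =>
          variations ++ [(PySem.List.pyRange 0 ((w.length : Nat) : Int) 1).foldl
            (fun b bit_pos =>
              PySem.List.pySetD b (PySem.List.pyGetD w bit_pos 0)
                (PySem.Int.band (num >>> ((w.length : Int) - 1 - bit_pos).toNat) 1)) base]) [] := rfl
  have hB : get_all_subsets_alt ff n = w.foldl stepB [base] := rfl
  rw [hA, hB]
  have hrange : ∀ p ∈ w, 0 ≤ p ∧ p < n := by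
    intro p hp
    exact PySem.List.mem_pyRange_one.mp (List.mem_filter.mp hp).1
  have hord : w.Pairwise (· < ·) :=
    List.Pairwise.sublist List.filter_sublist (PySem.List.pairwise_lt_pyRange_one 0 n)
  have hinv : ∀ p ∈ w, 0 ≤ p ∧ p.toNat < base.length ∧ base[p.toNat]? = some (0:Int) := by
    intro p hp
    obtain ⟨h0, hlt⟩ := hrange p hp
    have hplt : p.toNat < n.toNat := by omega
    refine ⟨h0, by rw [hbase, List.length_replicate]; exact hplt, ?_⟩
    rw [hbase, List.getElem?_replicate, if_pos hplt]
  have hcast : ((2:Int) ^ w.length) = (((2 ^ w.length : Nat)) : Int) := by push_cast; rfl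
  rw [hcast, PySem.List.pyRange_zero_nat (2 ^ w.length), PySem.List.foldl_append_singleton_eq_map,
    List.map_map, List.nil_append]
  have hrowfun : ∀ m ∈ List.range (2 ^ w.length),
      ((fun num : Int =>
          (PySem.List.pyRange 0 ((w.length : Nat) : Int) 1).foldl
            (fun b bit_pos =>
              PySem.List.pySetD b (PySem.List.pyGetD w bit_pos 0)
                (PySem.Int.band (num >>> ((w.length : Int) - 1 - bit_pos).toNat) 1)) base)
        ∘ fun k : Nat => (k : Int)) m = rowN w m base := by
    intro m hm
    simp only [Function.comp_apply]
    rw [innerA0 w (m : Int) base]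
    exact rowA_eq_rowN w m base (fun p hp => (hrange p hp).1)
  rw [List.map_congr_left hrowfun, main_eq w base hord hinv]
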